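-- pv_equiv track=rewrite | github.com/LAHumphreys/Xenoohage | lights_out.py | hit_button
-- ===== SOURCE A (Python) =====
-- tile_map = {
--     'A': 0,
--     '*': 1,
--     '=': 2,
--     '^': 3
-- }
--
-- inverse_tile_map = {tile_map[key]: key for key in tile_map}
--
-- def map_values(board, mapping):
--     def map_row(row):
--         return [mapping[col] for col in row]
--     return [map_row(row) for row in board]
--
-- def hit_button(board, buttons):
--     values = map_values(board, tile_map)
--
--     for row_index, column_index in buttons:
--         for row_i in range(3):
--             for col_i in range(3):
--                 if row_i == row_index or col_i == column_index:
--                     values[row_i][col_i] = (values[row_i][col_i] +1) % 4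
--
--     result = map_values(values, inverse_tile_map)
--     return result
-- ===== SOURCE B (Python) =====
-- tile_map = {
--     'A': 0,
--     '*': 1,
--     '=': 2,
--     '^': 3
-- }
--
-- inverse_tile_map = {tile_map[key]: key for key in tile_map}
--
-- def hit_button(board, buttons):
--     row_hits = {}
--     col_hits = {}
--     both = {}
--     for r, c in buttons:
--         row_hits[r] = row_hits.get(r, 0) + 1
--         col_hits[c] = col_hits.get(c, 0) + 1
--         both[(r, c)] = both.get((r, c), 0) + 1
--     result = []
--     for i, row in enumerate(board):
--         new_row = []
--         for j, tile in enumerate(row):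
--             v = tile_map[tile]
--             if i < 3 and j < 3:
--                 v = (v + row_hits.get(i, 0) + col_hits.get(j, 0) - both.get((i, j), 0)) % 4
--             new_row.append(inverse_tile_map[v])
--         result.append(new_row)
--     return result
-- ===== Notes on version B (the rewrite author's own statement) =====
-- stated objective: alternative
-- what changed: Instead of rescanning all 9 cells for every button, B tallies per-row, per-column and per-cell button hits in one pass over the buttons (three counters) and applies them to each cell once by inclusion-exclusion mod 4.
import Mathlib
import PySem

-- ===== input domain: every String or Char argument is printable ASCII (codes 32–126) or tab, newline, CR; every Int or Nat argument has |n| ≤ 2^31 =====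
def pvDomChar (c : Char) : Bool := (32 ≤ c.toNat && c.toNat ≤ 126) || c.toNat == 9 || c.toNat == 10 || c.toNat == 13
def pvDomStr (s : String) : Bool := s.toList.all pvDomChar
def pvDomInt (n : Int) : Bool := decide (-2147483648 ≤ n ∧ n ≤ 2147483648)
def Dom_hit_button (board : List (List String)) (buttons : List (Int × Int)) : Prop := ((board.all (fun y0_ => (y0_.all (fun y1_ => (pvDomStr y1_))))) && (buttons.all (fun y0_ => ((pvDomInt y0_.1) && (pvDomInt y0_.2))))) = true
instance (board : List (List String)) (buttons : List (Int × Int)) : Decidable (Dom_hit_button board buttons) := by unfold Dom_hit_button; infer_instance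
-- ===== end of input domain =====

-- B replaces A's per-button rescan of all 9 cells by one tally pass over the buttons
-- (row/column/cell hit counters) applied to each cell once (simpler single-shaped pass).

-- ===== PORT A =====
-- module-level dicts shared by both versions
def tile_map : PySem.Dict String Int :=
  PySem.Dict.ofList [("A", 0), ("*", 1), ("=", 2), ("^", 3)]
def inverse_tile_map : PySem.Dict Int String :=
  PySem.Dict.ofList [(0, "A"), (1, "*"), (2, "="), (3, "^")]

-- mapping[col] raises KeyError on a missing key; Pre_ excludes that, so getD's default is never the value
def map_values {α β : Type} [BEq α] (board : List (List α)) (mapping : PySem.Dict α β) (dflt : β) : List (List β) :=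
  board.map (fun row => row.map (fun col => mapping.getD col dflt))

-- body of 'for row_index, column_index in buttons' (the two range(3) loops);
-- values[row_i][col_i] = … raises IndexError out of range (excluded by Pre_); List.modify is then a no-op
def hitStep (vs : List (List Int)) (rc : Int × Int) : List (List Int) :=
  (PySem.List.pyRange 0 3 1).foldl (fun vs1 ri =>
    (PySem.List.pyRange 0 3 1).foldl (fun vs2 ci =>
      if ri == rc.1 || ci == rc.2 then
        vs2.modify ri.toNat (fun row => row.modify ci.toNat (fun v => PySem.Int.mod (v + 1) 4))
      else vs2) vs1) vs

def hit_button (board : List (List String)) (buttons : List (Int × Int)) : List (List String) :=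
  let values := map_values board tile_map 0
  let values := buttons.foldl hitStep values
  map_values values inverse_tile_map ""

-- ===== PORT B =====
def hit_button_alt (board : List (List String)) (buttons : List (Int × Int)) : List (List String) :=
  let tallies := buttons.foldl
    (fun (t : PySem.Dict Int Int × PySem.Dict Int Int × PySem.Dict (Int × Int) Int) rc =>
      (t.1.modify rc.1 0 (· + 1), t.2.1.modify rc.2 0 (· + 1), t.2.2.modify rc 0 (· + 1)))
    (PySem.Dict.empty, PySem.Dict.empty, PySem.Dict.empty)
  (PySem.List.enumerate board 0).map (fun p =>
    (PySem.List.enumerate p.2 0).map (fun q =>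
      let v := tile_map.getD q.2 0
      let v := if p.1 < 3 && q.1 < 3 then
          PySem.Int.mod (v + tallies.1.getD p.1 0 + tallies.2.1.getD q.1 0 - tallies.2.2.getD (p.1, q.1) 0) 4
        else v
      inverse_tile_map.getD v ""))

-- ===== PRECONDITION & SPEC =====
-- Pre_ = exactly the inputs where Python A returns: every tile is a known key of tile_map
-- (else KeyError) and for every button each in-range coordinate finds its full row/column
-- of cells among rows 0..2 / columns 0..2 (else IndexError).
def Pre_hit_button (board : List (List String)) (buttons : List (Int × Int)) : Prop :=
  (∀ row ∈ board, ∀ t ∈ row, t = "A" ∨ t = "*" ∨ t = "=" ∨ t = "^") ∧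
  (∀ rc ∈ buttons,
    (0 ≤ rc.1 ∧ rc.1 < 3 → rc.1.toNat < board.length ∧ 3 ≤ (board.getD rc.1.toNat []).length) ∧
    (0 ≤ rc.2 ∧ rc.2 < 3 → 3 ≤ board.length ∧ ∀ row ∈ board.take 3, rc.2.toNat < row.length))
instance (board : List (List String)) (buttons : List (Int × Int)) : Decidable (Pre_hit_button board buttons) := by
  unfold Pre_hit_button; infer_instance

def pvWitness_hit_button : List (List String) × (List (Int × Int)) :=
  ([["A", "*", "="], ["^", "A", "*"], ["=", "^", "A"]], [(0, 1), (2, 2), (-1, 0), (5, 7)])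

def Spec_hit_button (board : List (List String)) (buttons : List (Int × Int)) (out : List (List String)) : Prop := out = hit_button_alt board buttons
instance (board : List (List String)) (buttons : List (Int × Int)) (out : List (List String)) : Decidable (Spec_hit_button board buttons out) := by unfold Spec_hit_button; infer_instance

-- ===== CLAIM (what is proved, stated in full; the proofs are below) =====
def Claim_equal_hit_button : Prop := ∀ (board : List (List String)) (buttons : List (Int × Int)), Dom_hit_button board buttons → Pre_hit_button board buttons → Spec_hit_button board buttons (hit_button board buttons)
-- ===== LEMMAS AND PROOFS =====

-- cell access
def cget (vs : List (List Int)) (i j : Nat) : Option Int :=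
  vs[i]?.bind (fun row => row[j]?)

def hitfn : Int → Int := fun v => PySem.Int.mod (v + 1) 4

theorem pymod4 (a : Int) : PySem.Int.mod a 4 = a % 4 := by
  simp [PySem.Int.mod, Int.fmod_eq_emod]

theorem cget_cwrite (vs : List (List Int)) (a b i j : Nat) (g : Bool) (f : Int → Int) :
    cget (if g then vs.modify a (fun row => row.modify b f) else vs) i j
      = if g ∧ a = i ∧ b = j then (cget vs i j).map f else cget vs i j := by
  cases g with
  | false => simp
  | true =>
    have hlhs : cget (if (true = true) then vs.modify a (fun row => row.modify b f) else vs) i j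
        = cget (vs.modify a (fun row => row.modify b f)) i j := rfl
    rw [hlhs]
    by_cases hcond : a = i ∧ b = j
    · rw [if_pos ⟨rfl, hcond⟩]
      obtain ⟨rfl, rfl⟩ := hcond
      unfold cget
      simp only [List.getElem?_modify, Option.map_eq_map]
      cases hv : vs[a]? with
      | none => simp
      | some row =>
        simp only [Option.map_some, if_pos rfl, Option.bind_some, List.getElem?_modify,
          Option.map_eq_map]
        cases hr : row[b]? <;> simp_all
    · rw [if_neg (fun h => hcond h.2)]
      unfold cget
      simp only [List.getElem?_modify, Option.map_eq_map]
      by_cases hai : a = i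
      · subst hai
        have hbj : ¬ b = j := fun h => hcond ⟨rfl, h⟩
        cases hv : vs[a]? with
        | none => simp
        | some row =>
          simp only [Option.map_some, if_pos rfl, Option.bind_some, List.getElem?_modify,
            Option.map_eq_map]
          cases hr : row[j]? <;> simp_all [hbj]
      · cases hv : vs[i]? <;> simp [hai]

theorem cget_hitStep (vs : List (List Int)) (rc : Int × Int) (i j : Nat) :
    cget (hitStep vs rc) i j
      = if i < 3 ∧ j < 3 ∧ ((i : Int) = rc.1 ∨ (j : Int) = rc.2)
        then (cget vs i j).map hitfn else cget vs i j := by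
  obtain ⟨r, c⟩ := rc
  have hr : PySem.List.pyRange 0 3 1 = [0, 1, 2] := by decide
  unfold hitStep
  rw [hr]
  simp only [List.foldl_cons, List.foldl_nil,
    show ((0 : Int).toNat) = 0 from rfl, show ((1 : Int).toNat) = 1 from rfl,
    show ((2 : Int).toNat) = 2 from rfl]
  simp only [cget_cwrite]
  by_cases hij : i < 3 ∧ j < 3
  · obtain ⟨hi, hj⟩ := hij
    have hi' : i = 0 ∨ i = 1 ∨ i = 2 := by omega
    have hj' : j = 0 ∨ j = 1 ∨ j = 2 := by omega
    have hfn : hitfn = fun v => (v + 1) % 4 := funext fun v => pymod4 (v + 1)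
    rcases hi' with rfl | rfl | rfl <;> rcases hj' with rfl | rfl | rfl <;> simp [hfn, pymod4]
  · rw [if_neg (fun h => by rcases h with ⟨-, h1, h2⟩; omega),
        if_neg (fun h => by rcases h with ⟨-, h1, h2⟩; omega),
        if_neg (fun h => by rcases h with ⟨-, h1, h2⟩; omega),
        if_neg (fun h => by rcases h with ⟨-, h1, h2⟩; omega),
        if_neg (fun h => by rcases h with ⟨-, h1, h2⟩; omega),
        if_neg (fun h => by rcases h with ⟨-, h1, h2⟩; omega),
        if_neg (fun h => by rcases h with ⟨-, h1, h2⟩; omega),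
        if_neg (fun h => by rcases h with ⟨-, h1, h2⟩; omega),
        if_neg (fun h => by rcases h with ⟨-, h1, h2⟩; omega),
        if_neg (fun h => hij ⟨h.1, h.2.1⟩)]

def cnt (bs : List (Int × Int)) (i j : Nat) : Nat :=
  if i < 3 ∧ j < 3 then bs.countP (fun rc => (i : Int) == rc.1 || (j : Int) == rc.2) else 0

theorem cget_loop (bs : List (Int × Int)) (vs : List (List Int)) (i j : Nat) :
    cget (bs.foldl hitStep vs) i j = (cget vs i j).map (fun v => hitfn^[cnt bs i j] v) := by
  induction bs generalizing vs with
  | nil =>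
    simp only [List.foldl_nil, cnt, List.countP_nil, ite_self, Function.iterate_zero, id]
    cases cget vs i j <;> simp
  | cons b bs ih =>
    simp only [List.foldl_cons]
    rw [ih, cget_hitStep]
    by_cases hib : i < 3 ∧ j < 3 ∧ ((i : Int) = b.1 ∨ (j : Int) = b.2)
    · rw [if_pos hib]
      have hc : cnt (b :: bs) i j = cnt bs i j + 1 := by
        have : ((i : Int) == b.1 || (j : Int) == b.2) = true := by
          rcases hib.2.2 with h | h <;> simp [h]
        simp [cnt, hib.1, hib.2.1, List.countP_cons, this]
      rw [hc, Option.map_map]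
      cases cget vs i j with
      | none => rfl
      | some v => simp [Function.comp, Function.iterate_succ_apply]
    · rw [if_neg hib]
      have hc : cnt (b :: bs) i j = cnt bs i j := by
        by_cases hij : i < 3 ∧ j < 3
        · have : ((i : Int) == b.1 || (j : Int) == b.2) = false := by
            have hn := fun h => hib ⟨hij.1, hij.2, h⟩
            simp only [Bool.or_eq_false_iff, beq_eq_false_iff_ne]
            exact ⟨fun h => hn (Or.inl h), fun h => hn (Or.inr h)⟩
          simp [cnt, hij, List.countP_cons, this]
        · simp [cnt, hij]
      rw [hc]

theorem iter_hitfn (v : Int) (h0 : 0 ≤ v) (h4 : v < 4) (n : Nat) :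
    hitfn^[n] v = (v + n) % 4 := by
  induction n with
  | zero => simp [Int.emod_eq_of_lt h0 h4]
  | succ n ih =>
    rw [Function.iterate_succ_apply', ih]
    simp only [hitfn, pymod4]
    rw [Int.emod_add_emod]
    push_cast
    ring_nf

theorem tileVal_range (t : String) : 0 ≤ tile_map.getD t 0 ∧ tile_map.getD t 0 < 4 := by
  by_cases h1 : t = "A" <;> by_cases h2 : t = "*" <;> by_cases h3 : t = "=" <;> by_cases h4 : t = "^" <;>
    first
      | (subst_vars; decide)
      | (have hi : tile_map.items = [("A", (0 : Int)), ("*", 1), ("=", 2), ("^", 3)] := by decide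
         have e1 : ("A" == t) = false := by simp [Ne.symm h1]
         have e2 : ("*" == t) = false := by simp [Ne.symm h2]
         have e3 : ("=" == t) = false := by simp [Ne.symm h3]
         have e4 : ("^" == t) = false := by simp [Ne.symm h4]
         constructor <;> simp [PySem.Dict.getD, PySem.Dict.get?, hi, List.find?, e1, e2, e3, e4])

-- counters: getD of the modify-fold is the count of the key
theorem getD_fold_key {κ : Type} [BEq κ] [LawfulBEq κ] [DecidableEq κ]
    (key : (Int × Int) → κ) (bs : List (Int × Int)) (d : PySem.Dict κ Int) (v : κ) :
    (bs.foldl (fun d x => d.modify (key x) 0 (· + 1)) d).getD v 0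
      = d.getD v 0 + bs.countP (fun x => key x == v) := by
  induction bs generalizing d with
  | nil => simp
  | cons b bs ih =>
    simp only [List.foldl_cons, List.countP_cons, ih, PySem.Dict.getD_modify]
    by_cases h : v = key b
    · subst h; simp; omega
    · have : (key b == v) = false := by simp [Ne.symm h]
      simp [h, this]

-- the triple fold splits into three independent folds
theorem tallies_proj (bs : List (Int × Int))
    (t : PySem.Dict Int Int × PySem.Dict Int Int × PySem.Dict (Int × Int) Int) :
    bs.foldl
      (fun (t : PySem.Dict Int Int × PySem.Dict Int Int × PySem.Dict (Int × Int) Int) rc =>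
        (t.1.modify rc.1 0 (· + 1), t.2.1.modify rc.2 0 (· + 1), t.2.2.modify rc 0 (· + 1))) t
    = (bs.foldl (fun d x => d.modify x.1 0 (· + 1)) t.1,
       bs.foldl (fun d x => d.modify x.2 0 (· + 1)) t.2.1,
       bs.foldl (fun d x => d.modify x 0 (· + 1)) t.2.2) := by
  induction bs generalizing t with
  | nil => rfl
  | cons b bs ih => simp only [List.foldl_cons, ih]

theorem countP_or_int (bs : List (Int × Int)) (p q : (Int × Int) → Bool) :
    ((bs.countP (fun x => p x || q x) : Nat) : Int)
      = (bs.countP p : Int) + (bs.countP q : Int) - (bs.countP (fun x => p x && q x) : Int) := by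
  induction bs with
  | nil => simp
  | cons b bs ih =>
    simp only [List.countP_cons]
    by_cases hp : p b <;> by_cases hq : q b <;> simp [hp, hq] <;> push_cast <;> omega

-- a measurement preserved by each step of a fold is preserved by the fold
theorem foldl_inv {α γ : Type} (m : List (List Int) → γ)
    (f : List (List Int) → α → List (List Int))
    (h : ∀ vs a, m (f vs a) = m vs) :
    ∀ (l : List α) (vs : List (List Int)), m (l.foldl f vs) = m vs := by
  intro l
  induction l with
  | nil => intro vs; rfl
  | cons x l ih => intro vs; rw [List.foldl_cons, ih, h]

theorem hitStep_inv {γ : Type} (m : List (List Int) → γ)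
    (hm : ∀ (ws : List (List Int)) (a b : Nat) (f : Int → Int),
      m (ws.modify a (fun row => row.modify b f)) = m ws)
    (vs : List (List Int)) (rc : Int × Int) : m (hitStep vs rc) = m vs := by
  unfold hitStep
  refine foldl_inv m _ (fun vs1 ri => ?_) _ vs
  refine foldl_inv m _ (fun vs2 ci => ?_) _ vs1
  split
  · exact hm vs2 _ _ _
  · rfl

theorem loop_length (bs : List (Int × Int)) (vs : List (List Int)) :
    (bs.foldl hitStep vs).length = vs.length :=
  foldl_inv List.length hitStep
    (hitStep_inv List.length (fun ws a b f => List.length_modify (fun row => row.modify b f) ws a)) bs vs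

theorem loop_rowlen (bs : List (Int × Int)) (vs : List (List Int)) (i : Nat) :
    ((bs.foldl hitStep vs)[i]?).map List.length = (vs[i]?).map List.length := by
  refine foldl_inv (fun ws => (ws[i]?).map List.length) hitStep
    (hitStep_inv (fun ws => (ws[i]?).map List.length) (fun ws a b f => ?_)) bs vs
  simp only [List.getElem?_modify, Option.map_eq_map]
  by_cases hai : a = i
  · cases ws[i]? <;> simp [hai, List.length_modify]
  · cases ws[i]? <;> simp [hai]

-- the B-side cell value agrees with the iterated hit
theorem cell_formula (bs : List (Int × Int)) (i j : Nat) (v : Int) (h0 : 0 ≤ v) (h4 : v < 4) :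
    (if ((i : Int) < 3 && (j : Int) < 3) then
        PySem.Int.mod (v + (bs.foldl (fun d x => d.modify x.1 0 (· + 1)) PySem.Dict.empty).getD (i : Int) 0
            + (bs.foldl (fun d x => d.modify x.2 0 (· + 1)) PySem.Dict.empty).getD (j : Int) 0
            - (bs.foldl (fun d x => d.modify x 0 (· + 1)) PySem.Dict.empty).getD ((i : Int), (j : Int)) 0) 4
      else v)
    = hitfn^[cnt bs i j] v := by
  by_cases hij : i < 3 ∧ j < 3
  · have hb : ((i : Int) < 3 && (j : Int) < 3) = true := by
      simp only [Bool.and_eq_true, decide_eq_true_eq]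
      constructor <;> [exact_mod_cast hij.1; exact_mod_cast hij.2]
    rw [if_pos hb, iter_hitfn v h0 h4]
    rw [getD_fold_key (fun x => x.1), getD_fold_key (fun x => x.2), getD_fold_key (fun x => x)]
    simp only [PySem.Dict.getD_empty, zero_add]
    have hcnt : cnt bs i j = bs.countP (fun rc => (i : Int) == rc.1 || (j : Int) == rc.2) := by
      simp [cnt, hij]
    rw [hcnt, pymod4]
    have hie := countP_or_int bs (fun x => (i : Int) == x.1) (fun x => (j : Int) == x.2)
    have e1 : (bs.countP fun x => x.1 == (i : Int)) = (bs.countP fun x => (i : Int) == x.1) := by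
      apply List.countP_congr; intro x _; rw [Bool.beq_comm]
    have e2 : (bs.countP fun x => x.2 == (j : Int)) = (bs.countP fun x => (j : Int) == x.2) := by
      apply List.countP_congr; intro x _; rw [Bool.beq_comm]
    have e3 : (bs.countP fun x => x == ((i : Int), (j : Int)))
        = (bs.countP fun x => ((i : Int) == x.1) && ((j : Int) == x.2)) := by
      apply List.countP_congr; intro x _
      constructor <;> intro h
      · have := eq_of_beq h; subst this; simp
      · simp only [Bool.and_eq_true, beq_iff_eq] at h
        simp [Prod.ext_iff, h.1.symm, h.2.symm]
    rw [e1, e2, e3, hie]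
    ring_nf
  · have hn : ¬ (((i : Int) < 3 && (j : Int) < 3) = true) := by
      simp only [Bool.and_eq_true, decide_eq_true_eq]
      intro h
      exact hij ⟨by exact_mod_cast h.1, by exact_mod_cast h.2⟩
    rw [if_neg hn, show cnt bs i j = 0 by simp [cnt, hij]]
    rfl

theorem main_eq (board : List (List String)) (buttons : List (Int × Int)) :
    hit_button board buttons = hit_button_alt board buttons := by
  simp only [hit_button, hit_button_alt]
  rw [tallies_proj]
  apply List.ext_getElem?
  intro i
  simp only [map_values, List.getElem?_map, PySem.List.getElem?_enumerate]
  cases hb : board[i]? with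
  | none =>
    have hnone : (buttons.foldl hitStep (board.map (fun row => row.map (fun col => tile_map.getD col 0))))[i]? = none := by
      have hlen := loop_length buttons (map_values board tile_map 0)
      simp only [map_values] at hlen
      rw [List.getElem?_eq_none_iff, hlen, List.length_map, ← List.getElem?_eq_none_iff]
      exact hb
    simp [hnone]
  | some row =>
    have hrow := loop_rowlen buttons (map_values board tile_map 0) i
    simp only [map_values, List.getElem?_map, hb, Option.map_some, List.length_map] at hrow
    cases hl : (buttons.foldl hitStep (board.map (fun row => row.map (fun col => tile_map.getD col 0))))[i]? with
    | none => rw [hl] at hrow; simp at hrow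
    | some r =>
      rw [hl] at hrow
      simp only [Option.map_some, Option.some_inj] at hrow
      simp only [Option.map_some]
      congr 1
      apply List.ext_getElem?
      intro j
      simp only [List.getElem?_map, PySem.List.getElem?_enumerate]
      have hcell := cget_loop buttons (map_values board tile_map 0) i j
      simp only [cget, map_values, List.getElem?_map, hb, hl, Option.map_some, Option.bind_some] at hcell
      cases ht : row[j]? with
      | none =>
        have hrj : r[j]? = none := by
          rw [List.getElem?_eq_none_iff, hrow, ← List.getElem?_eq_none_iff]
          exact ht
        simp [hrj, ht]
      | some tile =>
        rw [ht] at hcell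
        simp only [Option.map_some] at hcell
        rw [hcell]
        simp only [Option.map_some]
        congr 1
        have hv := tileVal_range tile
        have hcf := cell_formula buttons i j (tile_map.getD tile 0) hv.1 hv.2
        simp only [zero_add]
        congr 1
        exact hcf.symm

-- ===== VERDICT (by name: the statement is the Claim_ definition above) =====
theorem hit_button_spec : Claim_equal_hit_button := by
  intro board buttons _ _
  unfold Spec_hit_button
  exact main_eq board buttons
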